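-- pv_equiv track=rewrite | github.com/victoriamreese/python-scripts | kata_tick_toward.py | tick_toward
-- ===== SOURCE A (Python) =====
-- def tick_toward(start, target):
--     x1, y1 = target
--     points = [start]
--     while points[-1] != target:
--         x2, y2 = points[-1]
--         a, b = (x2 < x1) - (x2 > x1), (y2 < y1) - (y2 > y1)
--         points.append((x2 + a, y2 + b))
--     return points
-- ===== SOURCE B (Python) =====
-- def tick_toward(start, target):
--     x0, y0 = start
--     x1, y1 = target
--     dx, dy = x1 - x0, y1 - y0
--     sx = (dx > 0) - (dx < 0)
--     sy = (dy > 0) - (dy < 0)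
--     n = max(abs(dx), abs(dy))
--     points = [start]
--     for i in range(1, n + 1):
--         points.append((x0 + sx * min(i, abs(dx)), y0 + sy * min(i, abs(dy))))
--     return points
-- ===== Notes on version B (the rewrite author's own statement) =====
-- stated objective: alternative
-- what changed: Replaces the while-loop that reads the previous point to decide each step with a direct index formula: point i is start + sign*min(i,|d|) per axis over range(1, max(|dx|,|dy|)+1).
import Mathlib
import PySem

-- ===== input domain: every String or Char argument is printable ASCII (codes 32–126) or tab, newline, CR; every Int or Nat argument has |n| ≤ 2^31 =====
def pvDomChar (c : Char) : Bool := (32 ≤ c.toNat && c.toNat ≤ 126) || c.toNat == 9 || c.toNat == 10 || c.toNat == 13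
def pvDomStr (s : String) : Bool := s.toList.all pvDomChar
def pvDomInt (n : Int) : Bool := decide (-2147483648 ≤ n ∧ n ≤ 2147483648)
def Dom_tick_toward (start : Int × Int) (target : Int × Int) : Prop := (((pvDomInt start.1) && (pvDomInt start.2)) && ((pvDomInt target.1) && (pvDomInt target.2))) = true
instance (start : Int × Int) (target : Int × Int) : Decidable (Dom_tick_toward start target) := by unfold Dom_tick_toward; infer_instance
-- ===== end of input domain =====

-- B computes each point directly from its index (start + sign*min(i,|d|) per axis)
-- instead of A's while-loop that reads the previous point; alternative decomposition, same cost.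

-- ===== PORT A =====
-- the while-loop of A: given the current last point, the points appended after it.
-- Structural recursion on a fuel that equals the exact number of remaining iterations
-- (the Chebyshev distance), so the fuel is only a totality device and never runs out.
def tickGo (target : Int × Int) : Nat → (Int × Int) → List (Int × Int)
  | 0, _ => []
  | n + 1, cur =>
    if cur = target then []
    else
      -- a, b = (x2 < x1) - (x2 > x1), (y2 < y1) - (y2 > y1)
      let a : Int := (if cur.1 < target.1 then 1 else 0) - (if target.1 < cur.1 then 1 else 0)
      let b : Int := (if cur.2 < target.2 then 1 else 0) - (if target.2 < cur.2 then 1 else 0)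
      (cur.1 + a, cur.2 + b) :: tickGo target n (cur.1 + a, cur.2 + b)

def tick_toward (start : Int × Int) (target : Int × Int) : List (Int × Int) :=
  start :: tickGo target (max (target.1 - start.1).natAbs (target.2 - start.2).natAbs) start

-- ===== PORT B =====
def tick_toward_alt (start : Int × Int) (target : Int × Int) : List (Int × Int) :=
  let dx := target.1 - start.1
  let dy := target.2 - start.2
  let sx : Int := (if 0 < dx then 1 else 0) - (if dx < 0 then 1 else 0)
  let sy : Int := (if 0 < dy then 1 else 0) - (if dy < 0 then 1 else 0)
  let n : Int := max (dx.natAbs : Int) (dy.natAbs : Int)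
  (PySem.List.pyRange 1 (n + 1) 1).foldl
    (fun pts i => pts ++ [(start.1 + sx * min i (dx.natAbs : Int),
                           start.2 + sy * min i (dy.natAbs : Int))])
    [start]

-- ===== PRECONDITION & SPEC =====
def Spec_tick_toward (start : Int × Int) (target : Int × Int) (out : List (Int × Int)) : Prop := out = tick_toward_alt start target
instance (start : Int × Int) (target : Int × Int) (out : List (Int × Int)) : Decidable (Spec_tick_toward start target out) := by unfold Spec_tick_toward; infer_instance

-- ===== CLAIM (what is proved, stated in full; the proofs are below) =====
def Claim_equal_tick_toward : Prop := ∀ (start : Int × Int) (target : Int × Int), Dom_tick_toward start target → Spec_tick_toward start target (tick_toward start target)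

-- ===== LEMMAS AND PROOFS =====

def pvSgn (d : Int) : Int := (if 0 < d then 1 else 0) - (if d < 0 then 1 else 0)

lemma pvSgn_cases (d : Int) :
    (d = 0 ∧ pvSgn d = 0) ∨ (0 < d ∧ pvSgn d = 1) ∨ (d < 0 ∧ pvSgn d = -1) := by
  unfold pvSgn; split_ifs <;> omega

lemma pvSgn_min_one (d : Int) : pvSgn d * min 1 (d.natAbs : Int) = pvSgn d := by
  unfold pvSgn; split_ifs <;> omega

lemma pvSgn_step (d i : Int) (hi : 0 ≤ i) :
    pvSgn d + pvSgn (d - pvSgn d) * min (i + 1) ((d - pvSgn d).natAbs : Int)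
      = pvSgn d * min (i + 2) (d.natAbs : Int) := by
  unfold pvSgn; split_ifs <;> omega

lemma tickGo_eq (tgt : Int × Int) (m : Nat) : ∀ (cur : Int × Int),
    m = max (tgt.1 - cur.1).natAbs (tgt.2 - cur.2).natAbs →
    tickGo tgt m cur = (List.range m).map (fun (i : Nat) =>
      (cur.1 + pvSgn (tgt.1 - cur.1) * min ((i : Int) + 1) (((tgt.1 - cur.1).natAbs : Int)),
       cur.2 + pvSgn (tgt.2 - cur.2) * min ((i : Int) + 1) (((tgt.2 - cur.2).natAbs : Int)))) := by
  induction m with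
  | zero =>
    intro cur hm
    simp [tickGo]
  | succ m ih =>
    intro cur hm
    have hne : cur ≠ tgt := by
      intro hc
      rw [Prod.ext_iff] at hc
      omega
    rw [tickGo, if_neg hne]
    have ha : ((if cur.1 < tgt.1 then (1:Int) else 0) - (if tgt.1 < cur.1 then 1 else 0))
        = pvSgn (tgt.1 - cur.1) := by unfold pvSgn; split_ifs <;> omega
    have hb : ((if cur.2 < tgt.2 then (1:Int) else 0) - (if tgt.2 < cur.2 then 1 else 0))
        = pvSgn (tgt.2 - cur.2) := by unfold pvSgn; split_ifs <;> omega
    simp only [ha, hb]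
    set dx := tgt.1 - cur.1 with hdx
    set dy := tgt.2 - cur.2 with hdy
    have hm' : m = max (tgt.1 - (cur.1 + pvSgn dx)).natAbs (tgt.2 - (cur.2 + pvSgn dy)).natAbs := by
      rcases pvSgn_cases dx with ⟨h1, e1⟩ | ⟨h1, e1⟩ | ⟨h1, e1⟩ <;>
        rcases pvSgn_cases dy with ⟨h2, e2⟩ | ⟨h2, e2⟩ | ⟨h2, e2⟩ <;>
          rw [e1, e2] <;> omega
    rw [ih _ hm']
    rw [List.range_succ_eq_map, List.map_cons, List.map_map]
    congr 1
    · -- head: first generated point equals formula at i = 0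
      have e1 := pvSgn_min_one dx
      have e2 := pvSgn_min_one dy
      simp only [Nat.cast_zero, zero_add]
      exact Prod.ext (by rw [e1]) (by rw [e2])
    · apply List.map_congr_left
      intro i _
      have d1 : tgt.1 - (cur.1 + pvSgn dx) = dx - pvSgn dx := by omega
      have d2 : tgt.2 - (cur.2 + pvSgn dy) = dy - pvSgn dy := by omega
      have s1 := pvSgn_step dx (i : Int) (by positivity)
      have s2 := pvSgn_step dy (i : Int) (by positivity)
      simp only [Function.comp, d1, d2, Nat.cast_succ]
      refine Prod.ext ?_ ?_
      · show cur.1 + pvSgn dx + pvSgn (dx - pvSgn dx) * min ((i : Int) + 1) _ = _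
        rw [add_assoc, s1]; ring_nf
      · show cur.2 + pvSgn dy + pvSgn (dy - pvSgn dy) * min ((i : Int) + 1) _ = _
        rw [add_assoc, s2]; ring_nf

-- ===== VERDICT (by name: the statement is the Claim_ definition above) =====
theorem tick_toward_spec : Claim_equal_tick_toward := by
  intro start target _
  unfold Spec_tick_toward tick_toward tick_toward_alt
  rw [PySem.List.foldl_append_singleton_eq_map, PySem.List.pyRange_one]
  rw [tickGo_eq target (max (target.1 - start.1).natAbs (target.2 - start.2).natAbs) start rfl]
  simp only [List.map_map, List.cons_append, List.nil_append]
  congr 1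
  · have : ((max ((target.1 - start.1).natAbs : Int) ((target.2 - start.2).natAbs : Int)) + 1 - 1).toNat
        = max (target.1 - start.1).natAbs (target.2 - start.2).natAbs := by omega
    rw [this]
    apply List.map_congr_left
    intro i _
    simp only [Function.comp]
    have h1 : (1 : Int) + (i : Int) = (i : Int) + 1 := by ring
    rw [h1]
    rfl
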